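-- pv_equiv track=rewrite | github.com/Bryantad/Sona | sona/lsp_server.py | _word_at
-- ===== SOURCE A (Python) =====
-- def _word_at(text: str, line: int, character: int) -> str:
--     lines = text.splitlines()
--     if line < 0 or line >= len(lines):
--         return ""
--     s = lines[line]
--     if not s:
--         return ""
--
--     i = min(max(character, 0), len(s))
--     left = i
--     while left > 0 and (s[left - 1].isalnum() or s[left - 1] == "_"):
--         left -= 1
--     right = i
--     while right < len(s) and (s[right].isalnum() or s[right] == "_"):
--         right += 1
--     return s[left:right]
-- ===== SOURCE B (Python) =====
-- def _word_at(text: str, line: int, character: int) -> str: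
--     lines = text.splitlines()
--     if line < 0 or line >= len(lines):
--         return ""
--     s = lines[line]
--     if not s:
--         return ""
--
--     i = min(max(character, 0), len(s))
--     # One forward pass: build all maximal word-character spans, then look up
--     # the unique span whose closed interval [start, end] contains i.
--     spans = []
--     k = 0
--     n = len(s)
--     while k < n:
--         if s[k].isalnum() or s[k] == "_":
--             e = k
--             while e < n and (s[e].isalnum() or s[e] == "_"):
--                 e += 1
--             spans.append((k, e))
--             k = e
--         else:
--             k += 1
--     for st, en in spans:
--         if st <= i <= en:
--             return s[st:en]
--     return ""
-- ===== Notes on version B (the rewrite author's own statement) =====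
-- stated objective: alternative
-- what changed: A expands left and right from the cursor with two outward point-scans; B makes one forward pass over the line to index all maximal word-character spans and then returns the unique span whose closed interval contains the clamped cursor position.
import Mathlib
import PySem

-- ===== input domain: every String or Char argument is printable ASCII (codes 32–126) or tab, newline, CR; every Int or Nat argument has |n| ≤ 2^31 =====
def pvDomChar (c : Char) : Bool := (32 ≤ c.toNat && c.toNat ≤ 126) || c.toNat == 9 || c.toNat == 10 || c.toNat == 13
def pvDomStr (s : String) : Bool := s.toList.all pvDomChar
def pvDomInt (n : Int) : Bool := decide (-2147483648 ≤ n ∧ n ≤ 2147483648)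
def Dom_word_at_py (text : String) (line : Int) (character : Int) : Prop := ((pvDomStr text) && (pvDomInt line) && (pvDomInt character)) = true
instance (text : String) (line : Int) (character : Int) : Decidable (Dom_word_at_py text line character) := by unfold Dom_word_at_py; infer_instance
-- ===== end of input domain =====

-- B replaces A's two outward point-scans by one forward pass that indexes all maximal
-- word-character spans and then looks the position up among them (objective: alternative).

-- shared character predicate: Python's `c.isalnum() or c == "_"`, read through a
-- bounds-safe lookup (both Pythons only ever index in range; out of range yields false)
def pvWordAt (cs : List Char) (j : Nat) : Bool :=
  PySem.Chars.isalnum (cs.getD j ' ') || (cs.getD j ' ' == '_')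

-- ===== PORT A =====
-- `while left > 0 and (s[left-1].isalnum() or s[left-1] == "_"): left -= 1`
def pvLeftA (cs : List Char) (l : Nat) : Nat :=
  if h : 0 < l ∧ pvWordAt cs (l - 1) = true then pvLeftA cs (l - 1) else l
termination_by l
decreasing_by omega

-- `while right < len(s) and (s[right].isalnum() or s[right] == "_"): right += 1`
def pvRightA (cs : List Char) (r : Nat) : Nat :=
  if h : r < cs.length ∧ pvWordAt cs r = true then pvRightA cs (r + 1) else r
termination_by cs.length - r
decreasing_by omega

def word_at_py (text : String) (line : Int) (character : Int) : String :=
  let lines := PySem.Str.splitlines text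
  if line < 0 ∨ (lines.length : Int) ≤ line then ""
  else
    let s := lines.getD line.toNat ""
    if s = "" then ""
    else
      let cs := s.toList
      let i := (min (max character 0) (cs.length : Int)).toNat
      let left := pvLeftA cs i
      let right := pvRightA cs i
      String.ofList (PySem.List.slice cs (some (left : Int)) (some (right : Int)))

-- ===== PORT B =====
-- inner `while e < n and (s[e].isalnum() or s[e] == "_"): e += 1`
def pvScanEnd (cs : List Char) (e : Nat) : Nat :=
  if h : e < cs.length ∧ pvWordAt cs e = true then pvScanEnd cs (e + 1) else e
termination_by cs.length - e
decreasing_by omega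

-- needed by pvSpans for termination: the inner scan never moves backwards
theorem pvScanEnd_ge (cs : List Char) (e : Nat) : e ≤ pvScanEnd cs e := by
  fun_induction pvScanEnd cs e with
  | case1 e h ih => omega
  | case2 e h => omega

-- outer loop of B: skip non-word chars, emit each maximal word span
def pvSpans (cs : List Char) (k : Nat) : List (Nat × Nat) :=
  if h : k < cs.length then
    if hw : pvWordAt cs k = true then
      (k, pvScanEnd cs k) :: pvSpans cs (pvScanEnd cs k)
    else pvSpans cs (k + 1)
  else []
termination_by cs.length - k
decreasing_by
  · have h1 : k + 1 ≤ pvScanEnd cs (k + 1) := pvScanEnd_ge cs (k + 1)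
    have h2 : pvScanEnd cs k = pvScanEnd cs (k + 1) := by
      rw [pvScanEnd]; simp [h, hw]
    omega
  · omega

def word_at_py_alt (text : String) (line : Int) (character : Int) : String :=
  let lines := PySem.Str.splitlines text
  if line < 0 ∨ (lines.length : Int) ≤ line then ""
  else
    let s := lines.getD line.toNat ""
    if s = "" then ""
    else
      let cs := s.toList
      let i := (min (max character 0) (cs.length : Int)).toNat
      match (pvSpans cs 0).find? (fun p => decide (p.1 ≤ i) && decide (i ≤ p.2)) with
      | some (st, en) =>
          String.ofList (PySem.List.slice cs (some (st : Int)) (some (en : Int)))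
      | none => ""

-- ===== PRECONDITION & SPEC =====
def Spec_word_at_py (text : String) (line : Int) (character : Int) (out : String) : Prop := out = word_at_py_alt text line character
instance (text : String) (line : Int) (character : Int) (out : String) : Decidable (Spec_word_at_py text line character out) := by unfold Spec_word_at_py; infer_instance

-- ===== CLAIM (what is proved, stated in full; the proofs are below) =====
def Claim_equal_word_at_py : Prop := ∀ (text : String) (line : Int) (character : Int), Dom_word_at_py text line character → Spec_word_at_py text line character (word_at_py text line character)

-- ===== LEMMAS AND PROOFS =====

theorem pvLeftA_spec (cs : List Char) (l : Nat) :
    pvLeftA cs l ≤ l ∧ (∀ j, pvLeftA cs l ≤ j → j < l → pvWordAt cs j = true) ∧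
      (pvLeftA cs l = 0 ∨ pvWordAt cs (pvLeftA cs l - 1) = false) := by
  fun_induction pvLeftA cs l with
  | case1 l h ih =>
    refine ⟨by omega, ?_, ih.2.2⟩
    intro j hj1 hj2
    rcases Nat.lt_or_ge j (l - 1) with hc | hc
    · exact ih.2.1 j hj1 hc
    · have : j = l - 1 := by omega
      subst this; exact h.2
  | case2 l h =>
    refine ⟨le_refl _, by omega, ?_⟩
    by_cases h0 : l = 0
    · exact Or.inl h0
    · right
      by_cases hw : pvWordAt cs (l - 1) = true
      · exact absurd ⟨by omega, hw⟩ h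
      · simpa using hw

theorem pvRightA_spec (cs : List Char) (r : Nat) :
    r ≤ pvRightA cs r ∧ (r ≤ cs.length → pvRightA cs r ≤ cs.length) ∧
      (∀ j, r ≤ j → j < pvRightA cs r → pvWordAt cs j = true) ∧
      (pvRightA cs r = cs.length ∨ pvWordAt cs (pvRightA cs r) = false) := by
  fun_induction pvRightA cs r with
  | case1 r h ih =>
    refine ⟨by omega, fun _ => ih.2.1 (by omega), ?_, ih.2.2.2⟩
    intro j hj1 hj2
    rcases Nat.lt_or_ge j (r + 1) with hc | hc
    · have : j = r := by omega
      subst this; exact h.2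
    · exact ih.2.2.1 j hc hj2
  | case2 r h =>
    refine ⟨le_refl _, fun hr => hr, by omega, ?_⟩
    by_cases hl : r = cs.length
    · exact Or.inl hl
    · right
      by_cases hw : pvWordAt cs r = true
      · by_cases hlt : r < cs.length
        · exact absurd ⟨hlt, hw⟩ h
        · unfold pvWordAt
          rw [List.getD_eq_default _ _ (by omega)]
          decide
      · simpa using hw
  
theorem pvScanEnd_eq (cs : List Char) (e : Nat) : pvScanEnd cs e = pvRightA cs e := by
  fun_induction pvScanEnd cs e with
  | case1 e h ih => rw [pvRightA]; simp [h, ih]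
  | case2 e h => rw [pvRightA]; simp [h]

-- what it means to be a maximal word-character span of cs
def pvMaxRun (cs : List Char) (st en : Nat) : Prop :=
  st < en ∧ en ≤ cs.length ∧ (∀ j, st ≤ j → j < en → pvWordAt cs j = true) ∧
    (st = 0 ∨ pvWordAt cs (st - 1) = false) ∧ (en = cs.length ∨ pvWordAt cs en = false)

theorem pvSpans_mem (cs : List Char) (k : Nat) (p : Nat × Nat) :
    p ∈ pvSpans cs k ↔ (k ≤ p.1 ∧ p.1 < p.2 ∧ p.2 ≤ cs.length ∧
      (∀ j, p.1 ≤ j → j < p.2 → pvWordAt cs j = true) ∧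
      (p.1 = k ∨ pvWordAt cs (p.1 - 1) = false) ∧
      (p.2 = cs.length ∨ pvWordAt cs p.2 = false)) := by
  obtain ⟨a, b⟩ := p
  fun_induction pvSpans cs k with
  | case1 k h hw ih =>
    have hge : k ≤ pvScanEnd cs k := pvScanEnd_ge cs k
    have hlen : pvScanEnd cs k ≤ cs.length := by
      rw [pvScanEnd_eq]; exact (pvRightA_spec cs k).2.1 (le_of_lt h)
    have hall : ∀ j, k ≤ j → j < pvScanEnd cs k → pvWordAt cs j = true := by
      rw [pvScanEnd_eq]; exact (pvRightA_spec cs k).2.2.1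
    have hbd : pvScanEnd cs k = cs.length ∨ pvWordAt cs (pvScanEnd cs k) = false := by
      rw [pvScanEnd_eq]; exact (pvRightA_spec cs k).2.2.2
    have hgt : k < pvScanEnd cs k := by
      by_cases hEk : pvScanEnd cs k = k
      · rcases hbd with hb | hb
        · omega
        · rw [hEk, hw] at hb; exact absurd hb (by simp)
      · omega
    simp only [List.mem_cons, ih]
    constructor
    · rintro (heq | ⟨h1, h2, h3, h4, h5, h6⟩)
      · injection heq with e1 e2
        subst e1
        subst e2
        exact ⟨le_refl _, hgt, hlen, fun j hj1 hj2 => hall j hj1 hj2, Or.inl rfl, hbd⟩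
      · refine ⟨by omega, h2, h3, h4, ?_, h6⟩
        right
        rcases h5 with h5 | h5
        · exfalso
          have hwa : pvWordAt cs a = true := h4 a (le_refl _) h2
          rcases hbd with hb | hb
          · omega
          · rw [← h5, hwa] at hb; exact absurd hb (by simp)
        · exact h5
    · rintro ⟨h1, h2, h3, h4, h5, h6⟩
      by_cases hak : a = k
      · subst hak
        left
        have hbe : b = pvScanEnd cs a := by
          by_cases hc : b < pvScanEnd cs a
          · exfalso
            have : pvWordAt cs b = true := hall b (by omega) hc
            rcases h6 with h6 | h6
            · omega
            · rw [h6] at this; exact absurd this (by simp)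
          · by_cases hc2 : pvScanEnd cs a < b
            · exfalso
              have : pvWordAt cs (pvScanEnd cs a) = true := h4 _ (by omega) hc2
              rcases hbd with hb | hb
              · omega
              · rw [hb] at this; exact absurd this (by simp)
            · omega
        rw [hbe]
      · right
        have hka : k < a := by omega
        have h5' : pvWordAt cs (a - 1) = false := by
          rcases h5 with h5 | h5
          · exact absurd h5 hak
          · exact h5
        have hEa : pvScanEnd cs k ≤ a := by
          by_cases hc : a < pvScanEnd cs k
          · exfalso
            have : pvWordAt cs (a - 1) = true := hall (a - 1) (by omega) (by omega)
            rw [h5'] at this; exact absurd this (by simp)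
          · omega
        exact ⟨hEa, h2, h3, h4, Or.inr h5', h6⟩
  | case2 k h hw ih =>
    simp only [ih]
    constructor
    · rintro ⟨h1, h2, h3, h4, h5, h6⟩
      refine ⟨by omega, h2, h3, h4, ?_, h6⟩
      rcases h5 with h5 | h5
      · right; rw [h5]; simpa using hw
      · exact Or.inr h5
    · rintro ⟨h1, h2, h3, h4, h5, h6⟩
      have hak : a ≠ k := by
        intro hk
        subst hk
        exact hw (h4 a (le_refl _) h2)
      refine ⟨by omega, h2, h3, h4, ?_, h6⟩
      rcases h5 with h5 | h5
      · exact absurd h5 hak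
      · exact Or.inr h5
  | case3 k h =>
    simp only [List.not_mem_nil, false_iff]
    rintro ⟨h1, h2, h3, _, _, _⟩
    omega

theorem pvMaxRun_unique (cs : List Char) (i : Nat) (p q : Nat × Nat)
    (hp : pvMaxRun cs p.1 p.2) (hq : pvMaxRun cs q.1 q.2)
    (hpi : p.1 ≤ i ∧ i ≤ p.2) (hqi : q.1 ≤ i ∧ i ≤ q.2) : p = q := by
  obtain ⟨hp1, hp2, hp3, hp4, hp5⟩ := hp
  obtain ⟨hq1, hq2, hq3, hq4, hq5⟩ := hq
  have hstart : ∀ (x y : Nat × Nat), x.1 < x.2 → y.1 < y.2 →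
      (∀ j, x.1 ≤ j → j < x.2 → pvWordAt cs j = true) →
      (y.1 = 0 ∨ pvWordAt cs (y.1 - 1) = false) →
      x.1 ≤ i → i ≤ x.2 → y.1 ≤ i → ¬ x.1 < y.1 := by
    intro x y hx hy hxall hybd hxi1 hxi2 hyi1 hlt
    rcases hybd with hy0 | hyw
    · omega
    · by_cases hin : y.1 - 1 < x.2
      · have := hxall (y.1 - 1) (by omega) hin
        rw [hyw] at this; exact absurd this (by simp)
      · omega
  have h1 : p.1 = q.1 := by
    by_cases hc : p.1 < q.1
    · exact absurd hc (hstart p q hp1 hq1 hp3 hq4 hpi.1 hpi.2 hqi.1)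
    · by_cases hc2 : q.1 < p.1
      · exact absurd hc2 (hstart q p hq1 hp1 hq3 hp4 hqi.1 hqi.2 hpi.1)
      · omega
  have hend : ∀ (x y : Nat × Nat), x.1 = y.1 → x.1 < x.2 → y.1 < y.2 → y.2 ≤ cs.length →
      (∀ j, y.1 ≤ j → j < y.2 → pvWordAt cs j = true) →
      (x.2 = cs.length ∨ pvWordAt cs x.2 = false) → ¬ x.2 < y.2 := by
    intro x y hxy hx hy hylen hyall hxbd hlt
    have : pvWordAt cs x.2 = true := hyall x.2 (by omega) hlt
    rcases hxbd with hb | hb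
    · omega
    · rw [hb] at this; exact absurd this (by simp)
  have h2 : p.2 = q.2 := by
    by_cases hc : p.2 < q.2
    · exact absurd hc (hend p q h1 hp1 hq1 hq2 hq3 hp5)
    · by_cases hc2 : q.2 < p.2
      · exact absurd hc2 (hend q p h1.symm hq1 hp1 hp2 hp3 hq5)
      · omega
  exact Prod.ext h1 h2

theorem pvCore (cs : List Char) (i : Nat) (hi : i ≤ cs.length) :
    (match (pvSpans cs 0).find? (fun p => decide (p.1 ≤ i) && decide (i ≤ p.2)) with
      | some (st, en) => PySem.List.slice cs (some (st : Int)) (some (en : Int))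
      | none => ([] : List Char))
    = PySem.List.slice cs (some ((pvLeftA cs i : Nat) : Int)) (some ((pvRightA cs i : Nat) : Int)) := by
  have hl := pvLeftA_spec cs i
  have hr := pvRightA_spec cs i
  by_cases hlr : pvLeftA cs i < pvRightA cs i
  · -- the loops found a nonempty word: it is a maximal run, and the unique span lookup hits it
    have hrun : pvMaxRun cs (pvLeftA cs i) (pvRightA cs i) := by
      refine ⟨hlr, hr.2.1 hi, ?_, hl.2.2, hr.2.2.2⟩
      intro j hj1 hj2
      rcases Nat.lt_or_ge j i with hc | hc
      · exact hl.2.1 j hj1 hc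
      · exact hr.2.2.1 j hc hj2
    have hmem : (pvLeftA cs i, pvRightA cs i) ∈ pvSpans cs 0 := by
      rw [pvSpans_mem]
      exact ⟨Nat.zero_le _, hrun.1, hrun.2.1, hrun.2.2.1, hrun.2.2.2.1, hrun.2.2.2.2⟩
    have hex : ∃ x ∈ pvSpans cs 0, (fun p : Nat × Nat => decide (p.1 ≤ i) && decide (i ≤ p.2)) x = true := by
      exact ⟨_, hmem, by simp [hl.1, hr.1]⟩
    obtain ⟨q, hq⟩ := Option.isSome_iff_exists.mp (List.find?_isSome.mpr hex)
    have hqp := List.find?_some hq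
    have hqmem := List.mem_of_find?_eq_some hq
    have hqrun : pvMaxRun cs q.1 q.2 := by
      have := (pvSpans_mem cs 0 q).1 hqmem
      exact ⟨this.2.1, this.2.2.1, this.2.2.2.1, this.2.2.2.2.1, this.2.2.2.2.2⟩
    have hqi : q.1 ≤ i ∧ i ≤ q.2 := by
      simp only [Bool.and_eq_true, decide_eq_true_eq] at hqp
      exact hqp
    have hqe : q = (pvLeftA cs i, pvRightA cs i) :=
      pvMaxRun_unique cs i q (pvLeftA cs i, pvRightA cs i) hqrun hrun hqi ⟨hl.1, hr.1⟩
    rw [hq, hqe]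
  · -- the loops met: i touches no word character, and no span contains it
    have hli : pvLeftA cs i = i := by omega
    have hri : pvRightA cs i = i := by omega
    have hnone : (pvSpans cs 0).find? (fun p => decide (p.1 ≤ i) && decide (i ≤ p.2)) = none := by
      rw [List.find?_eq_none]
      intro q hqmem hqp
      have hqrun := (pvSpans_mem cs 0 q).1 hqmem
      simp only [Bool.and_eq_true, decide_eq_true_eq] at hqp
      by_cases hc : i < q.2
      · have hwi : pvWordAt cs i = true := hqrun.2.2.2.1 i hqp.1 hc
        rcases hr.2.2.2 with hb | hb
        · omega
        · rw [hri, hwi] at hb; exact absurd hb (by simp)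
      · have hiq : i = q.2 := by omega
        have hwi : pvWordAt cs (i - 1) = true := hqrun.2.2.2.1 (i - 1) (by omega) (by omega)
        rcases hl.2.2 with hb | hb
        · omega
        · rw [hli, hwi] at hb; exact absurd hb (by simp)
    rw [hnone]
    simp only [PySem.List.slice_natCast, hli, hri, Nat.sub_self, List.take_zero]

-- ===== VERDICT (by name: the statement is the Claim_ definition above) =====
theorem word_at_py_spec : Claim_equal_word_at_py := by
  intro text line character _
  unfold Spec_word_at_py word_at_py word_at_py_alt
  simp only []
  split_ifs with h1 h2
  · rfl
  · rfl
  · set s := (PySem.Str.splitlines text).getD line.toNat ""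
    set cs := s.toList
    set i := (min (max character 0) (cs.length : Int)).toNat with hidef
    have hi : i ≤ cs.length := by
      have : (min (max character 0) (cs.length : Int)) ≤ (cs.length : Int) := min_le_right _ _
      omega
    have := pvCore cs i hi
    rcases hfind : (pvSpans cs 0).find? (fun p => decide (p.1 ≤ i) && decide (i ≤ p.2)) with _ | ⟨st, en⟩
    · rw [hfind] at this
      simp only at this
      rw [← this, hfind]
    · rw [hfind] at this
      simp only at this
      rw [← this, hfind]
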